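-- pv_equiv track=rewrite | github.com/saccofrancesco/crosswords-solver | main.py | clean_and_split_clues
-- ===== SOURCE A (Python) =====
-- def clean_and_split_clues(text: str) -> list:
--
--     # Clean the data
--     text = text.replace(
--         "ORIZZONTALI",
--         "").replace(
--         "VERTICALI",
--         "").replace(
--             ":",
--             "").replace(
--                 "-",
--                 "").replace(
--                     "_",
--                     "").replace(
--                         ".",
--         "")
--     not_filtered_list = text.split()
--
--     # Split the clues
--     cleared_clues = []
--     current_clue = ""
--     for word in not_filtered_list:
--         if word.isdigit() and len(word) not in [3, 4]:
--             if current_clue: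
--                 cleared_clues.append(current_clue.strip())
--                 current_clue = ""
--         else:
--             current_clue += f"{word} "
--     if current_clue:
--         cleared_clues.append(current_clue.strip())
--
--     return cleared_clues
-- ===== SOURCE B (Python) =====
-- # B: span-based splitting — slice off one maximal run of non-delimiter words at a
-- # time instead of accumulating a string and flushing on each delimiter.
--
-- def _is_delim(w):
--     return w.isdigit() and len(w) not in (3, 4)
--
-- def clean_and_split_clues(text: str) -> list:
--     for junk in ("ORIZZONTALI", "VERTICALI", ":", "-", "_", "."):
--         text = text.replace(junk, "")
--     words = text.split()
--     clues = []
--     while words: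
--         if _is_delim(words[0]):
--             words = words[1:]
--         else:
--             k = 1
--             while k < len(words) and not _is_delim(words[k]):
--                 k += 1
--             clues.append(" ".join(words[:k]))
--             words = words[k:]
--     return clues
-- ===== Notes on version B (the rewrite author's own statement) =====
-- stated objective: alternative
-- what changed: Replaces A's accumulate-a-clue-string-and-flush-on-each-delimiter loop by span-based splitting: repeatedly drop a leading delimiter word or slice off the maximal run of non-delimiter words and join it in one step.
import Mathlib
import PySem

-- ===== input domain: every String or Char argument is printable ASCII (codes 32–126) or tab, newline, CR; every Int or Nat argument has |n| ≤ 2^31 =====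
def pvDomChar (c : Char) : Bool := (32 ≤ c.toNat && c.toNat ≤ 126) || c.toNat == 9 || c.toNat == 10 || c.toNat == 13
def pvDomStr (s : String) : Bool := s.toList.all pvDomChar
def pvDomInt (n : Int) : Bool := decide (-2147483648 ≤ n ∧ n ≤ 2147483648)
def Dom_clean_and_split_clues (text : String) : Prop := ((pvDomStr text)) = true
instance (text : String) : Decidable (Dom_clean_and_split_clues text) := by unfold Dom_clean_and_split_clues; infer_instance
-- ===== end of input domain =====

-- B replaces A's accumulate-a-string-and-flush-on-delimiter loop by span-based
-- splitting (slice off one maximal run of non-delimiter words at a time); objective: alternative decomposition.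

-- ===== PORT A =====
def clean_and_split_clues (text : String) : List String :=
  -- the replace chain
  let t := PySem.Str.replace (PySem.Str.replace (PySem.Str.replace (PySem.Str.replace
    (PySem.Str.replace (PySem.Str.replace text "ORIZZONTALI" "") "VERTICALI" "")
      ":" "") "-" "") "_" "") "." ""
  let not_filtered_list := PySem.Str.split₀ t
  -- the accumulate/flush loop over (cleared_clues, current_clue)
  let p := not_filtered_list.foldl
    (fun (st : List String × String) word =>
      if PySem.Str.strIsdigit word && !(PySem.Str.len word == 3 || PySem.Str.len word == 4) then
        if st.2 == "" then st else (st.1 ++ [PySem.Str.strip st.2], "")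
      else
        (st.1, st.2 ++ word ++ " "))
    ([], "")
  if p.2 == "" then p.1 else p.1 ++ [PySem.Str.strip p.2]

-- ===== PORT B =====
def pvIsDelim (w : String) : Bool :=
  PySem.Str.strIsdigit w && !(PySem.Str.len w == 3 || PySem.Str.len w == 4)

-- Source B's while loop: drop a leading delimiter, or slice off the maximal
-- non-delimiter run words[:k] (first word known non-delimiter, scan from index 1)
def pvRuns : List String → List String
  | [] => []
  | w :: ws =>
    if pvIsDelim w then pvRuns ws
    else
      PySem.Str.join " " (w :: ws.takeWhile (fun x => !pvIsDelim x)) ::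
        pvRuns (ws.dropWhile (fun x => !pvIsDelim x))
termination_by ws => ws.length
decreasing_by
  · simp
  · have h := List.length_dropWhile_le (fun x => !pvIsDelim x) ws
    simp only [List.length_cons]
    omega

def clean_and_split_clues_alt (text : String) : List String :=
  pvRuns (PySem.Str.split₀
    (["ORIZZONTALI", "VERTICALI", ":", "-", "_", "."].foldl
      (fun t junk => PySem.Str.replace t junk "") text))

-- ===== PRECONDITION & SPEC =====
def Spec_clean_and_split_clues (text : String) (out : List String) : Prop := out = clean_and_split_clues_alt text
instance (text : String) (out : List String) : Decidable (Spec_clean_and_split_clues text out) := by unfold Spec_clean_and_split_clues; infer_instance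

-- ===== CLAIM (what is proved, stated in full; the proofs are below) =====
def Claim_equal_clean_and_split_clues : Prop := ∀ (text : String), Dom_clean_and_split_clues text → Spec_clean_and_split_clues text (clean_and_split_clues text)

-- ===== LEMMAS AND PROOFS =====

-- A word is "good" if it is nonempty and contains no whitespace (true of every word of str.split())
def pvGoodW (w : String) : Prop :=
  w.toList ≠ [] ∧ ∀ c ∈ w.toList, PySem.Chars.isspace c = false

-- current_clue as a function of the words accumulated so far
def pvCtL (rs : List (List Char)) : List Char := (rs.map (· ++ [' '])).flatten
def pvCt (run : List String) : String := String.ofList (pvCtL (run.map String.toList))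

-- A's loop body, named
def pvStepA (st : List String × String) (word : String) : List String × String :=
  if PySem.Str.strIsdigit word && !(PySem.Str.len word == 3 || PySem.Str.len word == 4) then
    if st.2 == "" then st else (st.1 ++ [PySem.Str.strip st.2], "")
  else
    (st.1, st.2 ++ word ++ " ")

def pvClose (run : List String) : List String :=
  if run = [] then [] else [PySem.Str.join " " run]

-- common recursive specification: split with an explicit pending run
def pvSplitR (run : List String) : List String → List String
  | [] => pvClose run
  | w :: ws => if pvIsDelim w then pvClose run ++ pvSplitR [] ws else pvSplitR (run ++ [w]) ws

lemma pvCt_nil : pvCt [] = "" := rfl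

lemma pvCtL_ne_nil (x : List Char) (rs : List (List Char)) : pvCtL (x :: rs) ≠ [] := by
  simp [pvCtL]

lemma pvCt_concat (run : List String) (w : String) :
    pvCt (run ++ [w]) = pvCt run ++ w ++ " " := by
  rw [← String.toList_inj]
  simp [pvCt, pvCtL, String.toList_append]

lemma pvCt_eq_empty_iff (run : List String) : (pvCt run == "") = true ↔ run = [] := by
  rw [beq_iff_eq, ← String.toList_inj]
  cases run with
  | nil => simp [pvCt, pvCtL]
  | cons x rs => simp [pvCt]; exact pvCtL_ne_nil _ _

lemma pvCt_ne_empty {run : List String} (h : run ≠ []) : (pvCt run == "") = false := by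
  rcases hb : (pvCt run == "") with _ | _
  · rfl
  · exact absurd ((pvCt_eq_empty_iff run).mp hb) h

lemma pv_intercalate_cons_cons (x y : List Char) (ys : List (List Char)) :
    List.intercalate [' '] (x :: y :: ys) = x ++ [' '] ++ List.intercalate [' '] (y :: ys) := by
  simp [List.intercalate, List.intersperse]

lemma pv_intercalate_concat (xs : List (List Char)) (y : List Char) (h : xs ≠ []) :
    List.intercalate [' '] (xs ++ [y]) = List.intercalate [' '] xs ++ [' '] ++ y := by
  induction xs with
  | nil => exact absurd rfl h
  | cons x xs ih =>
    cases xs with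
    | nil => simp [List.intercalate]
    | cons x' xs' =>
      calc List.intercalate [' '] ((x :: x' :: xs') ++ [y])
          = List.intercalate [' '] (x :: x' :: (xs' ++ [y])) := by simp
        _ = x ++ [' '] ++ List.intercalate [' '] (x' :: (xs' ++ [y])) :=
            pv_intercalate_cons_cons x x' (xs' ++ [y])
        _ = x ++ [' '] ++ (List.intercalate [' '] (x' :: xs') ++ [' '] ++ y) := by
            rw [show x' :: (xs' ++ [y]) = (x' :: xs') ++ [y] by simp, ih (by simp)]
        _ = List.intercalate [' '] (x :: x' :: xs') ++ [' '] ++ y := by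
            rw [pv_intercalate_cons_cons x x' xs']; simp
  
lemma pvCtL_eq_intercalate (rs : List (List Char)) (h : rs ≠ []) :
    pvCtL rs = List.intercalate [' '] rs ++ [' '] := by
  induction rs with
  | nil => exact absurd rfl h
  | cons x rs ih =>
    cases rs with
    | nil => simp [pvCtL, List.intercalate]
    | cons y ys =>
      rw [pv_intercalate_cons_cons]
      simp only [pvCtL, List.map_cons, List.flatten_cons] at *
      rw [ih (by simp)]
      simp

lemma pv_dropWhile_reverse (l : List Char) (t : List Char) (h : l ≠ [])
    (hg : ∀ c ∈ l, PySem.Chars.isspace c = false) :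
    List.dropWhile PySem.Chars.isspace (l.reverse ++ t) = l.reverse ++ t := by
  cases hr : l.reverse with
  | nil => simp at hr; exact absurd hr h
  | cons d r =>
    have hd : d ∈ l := by
      have : d ∈ l.reverse := by rw [hr]; exact List.mem_cons_self
      simpa using this
    rw [List.cons_append, List.dropWhile_cons, hg d hd]
    simp

lemma pv_rstrip_ic (rs : List (List Char)) (h : rs ≠ [])
    (hg : ∀ w ∈ rs, w ≠ [] ∧ ∀ c ∈ w, PySem.Chars.isspace c = false) :
    PySem.Chars.rstrip (List.intercalate [' '] rs ++ [' ']) = List.intercalate [' '] rs := by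
  obtain ⟨rs', wk, hck⟩ := (List.eq_nil_or_concat rs).resolve_left h
  rw [List.concat_eq_append] at hck
  rw [hck] at hg ⊢
  obtain ⟨hnek, hnsk⟩ := hg wk (by simp)
  rw [PySem.Chars.rstrip]
  have hrev : (List.intercalate [' '] (rs' ++ [wk]) ++ [' ']).reverse
      = ' ' :: (List.intercalate [' '] (rs' ++ [wk])).reverse := by simp
  rw [hrev, List.dropWhile_cons]
  have hsp : PySem.Chars.isspace ' ' = true := by decide
  rw [hsp]
  simp only [if_true]
  cases hrs' : rs' with
  | nil =>
    subst hrs'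
    have h1 : List.intercalate [' '] ([] ++ [wk]) = wk := by simp [List.intercalate]
    rw [h1, ← List.append_nil wk.reverse, pv_dropWhile_reverse wk [] hnek hnsk]
    simp
  | cons a b =>
    rw [pv_intercalate_concat _ _ (by simp)]
    have h2 : (List.intercalate [' '] (a :: b) ++ [' '] ++ wk).reverse
        = wk.reverse ++ (List.intercalate [' '] (a :: b) ++ [' ']).reverse := by simp
    rw [h2, pv_dropWhile_reverse wk _ hnek hnsk]
    simp

lemma pv_strip_ctL (rs : List (List Char)) (h : rs ≠ [])
    (hg : ∀ w ∈ rs, w ≠ [] ∧ ∀ c ∈ w, PySem.Chars.isspace c = false) :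
    PySem.Chars.strip (pvCtL rs) = List.intercalate [' '] rs := by
  rw [pvCtL_eq_intercalate rs h]
  obtain ⟨w1, rs', rfl⟩ : ∃ w1 rs', rs = w1 :: rs' := by
    cases rs with
    | nil => exact absurd rfl h
    | cons a b => exact ⟨a, b, rfl⟩
  obtain ⟨hne1, hns1⟩ := hg w1 List.mem_cons_self
  obtain ⟨c1, cs1, rfl⟩ : ∃ c cs, w1 = c :: cs := by
    cases w1 with
    | nil => exact absurd rfl hne1
    | cons a b => exact ⟨a, b, rfl⟩
  have hic : ∃ z, List.intercalate [' '] ((c1 :: cs1) :: rs') ++ [' '] = c1 :: z := by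
    cases rs' with
    | nil => exact ⟨cs1 ++ [' '], by simp [List.intercalate]⟩
    | cons y ys => exact ⟨cs1 ++ [' '] ++ List.intercalate [' '] (y :: ys) ++ [' '],
        by rw [pv_intercalate_cons_cons]; simp⟩
  obtain ⟨z, hz⟩ := hic
  rw [PySem.Chars.strip, PySem.Chars.lstrip, hz, List.dropWhile_cons,
    hns1 c1 List.mem_cons_self, ← hz]
  simp only [Bool.false_eq_true, if_false]
  exact pv_rstrip_ic _ (by simp) hg

lemma pv_strip_ct (run : List String) (h : run ≠ []) (hg : ∀ w ∈ run, pvGoodW w) :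
    PySem.Str.strip (pvCt run) = PySem.Str.join " " run := by
  rw [← String.toList_inj]
  have hmap : run.map String.toList ≠ [] := by simpa using h
  have hgood : ∀ w ∈ run.map String.toList, w ≠ [] ∧ ∀ c ∈ w, PySem.Chars.isspace c = false := by
    intro w hw
    obtain ⟨v, hv, rfl⟩ := List.mem_map.mp hw
    exact hg v hv
  simp only [PySem.Str.strip, PySem.Str.join, pvCt, String.toList_ofList]
  rw [pv_strip_ctL _ hmap hgood]
  rfl

-- A's loop with a pending run equals pvSplitR
lemma pv_foldA (ws : List String) : ∀ (acc run : List String),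
    (∀ w ∈ run, pvGoodW w) → (∀ w ∈ ws, pvGoodW w) →
    (let p := ws.foldl pvStepA (acc, pvCt run) ;
     if p.2 == "" then p.1 else p.1 ++ [PySem.Str.strip p.2]) = acc ++ pvSplitR run ws := by
  induction ws with
  | nil =>
    intro acc run hrun _
    by_cases h : run = []
    · subst h
      simp only [List.foldl_nil, pvCt_nil]
      simp [pvSplitR, pvClose]
    · simp only [List.foldl_nil, pvCt_ne_empty h, Bool.false_eq_true, if_false]
      rw [pv_strip_ct run h hrun]
      simp [pvSplitR, pvClose, h]
  | cons w ws ih =>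
    intro acc run hrun hws
    simp only [List.foldl_cons]
    have hw : pvGoodW w := hws w List.mem_cons_self
    have hws' : ∀ v ∈ ws, pvGoodW v := fun v hv => hws v (List.mem_cons_of_mem _ hv)
    by_cases hd : pvIsDelim w = true
    · have hd' : (PySem.Str.strIsdigit w && !(PySem.Str.len w == 3 || PySem.Str.len w == 4)) = true := hd
      by_cases h : run = []
      · subst h
        have hstep : pvStepA (acc, pvCt []) w = (acc, pvCt []) := by
          unfold pvStepA
          rw [if_pos hd', if_pos (show ((acc, pvCt []).2 == "") = true from rfl)]
        rw [hstep, ih acc [] (by simp) hws']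
        simp [pvSplitR, hd, pvClose]
      · have hstep : pvStepA (acc, pvCt run) w = (acc ++ [PySem.Str.strip (pvCt run)], pvCt []) := by
          unfold pvStepA
          rw [if_pos hd', if_neg (by rw [show ((acc, pvCt run).2 == "") = (pvCt run == "") from rfl, pvCt_ne_empty h]; simp)]
          rfl
        rw [hstep, ih (acc ++ [PySem.Str.strip (pvCt run)]) [] (by simp) hws']
        rw [pv_strip_ct run h hrun]
        simp [pvSplitR, hd, pvClose, h]
    · have hd' : ¬ (PySem.Str.strIsdigit w && !(PySem.Str.len w == 3 || PySem.Str.len w == 4)) = true := hd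
      have hstep : pvStepA (acc, pvCt run) w = (acc, pvCt (run ++ [w])) := by
        unfold pvStepA
        rw [if_neg hd', pvCt_concat]
      rw [hstep, ih acc (run ++ [w])
        (by intro v hv
            rcases List.mem_append.mp hv with h1 | h1
            · exact hrun v h1
            · simp at h1; subst h1; exact hw) hws']
      have : pvSplitR run (w :: ws) = pvSplitR (run ++ [w]) ws := by
        simp [pvSplitR, hd]
      rw [this]

-- pvSplitR with a nonempty pending run swallows the leading non-delimiter span
lemma pv_splitR_pending (ws : List String) : ∀ run, run ≠ [] →
    pvSplitR run ws = PySem.Str.join " " (run ++ ws.takeWhile (fun x => !pvIsDelim x)) ::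
      pvSplitR [] (ws.dropWhile (fun x => !pvIsDelim x)) := by
  induction ws with
  | nil => intro run h; simp [pvSplitR, pvClose, h]
  | cons w ws ih =>
    intro run h
    by_cases hd : pvIsDelim w = true
    · have ht : List.takeWhile (fun x => !pvIsDelim x) (w :: ws) = [] := by
        simp [hd]
      have hdr : List.dropWhile (fun x => !pvIsDelim x) (w :: ws) = w :: ws := by
        simp [hd]
      rw [ht, hdr]
      simp [pvSplitR, hd, pvClose, h]
    · have ht : List.takeWhile (fun x => !pvIsDelim x) (w :: ws)
          = w :: List.takeWhile (fun x => !pvIsDelim x) ws := by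
        simp [hd]
      have hdr : List.dropWhile (fun x => !pvIsDelim x) (w :: ws)
          = List.dropWhile (fun x => !pvIsDelim x) ws := by
        simp [hd]
      rw [ht, hdr]
      have h1 : pvSplitR run (w :: ws) = pvSplitR (run ++ [w]) ws := by
        simp [pvSplitR, hd]
      rw [h1, ih (run ++ [w]) (by simp)]
      simp

lemma pv_runs_eq_splitR (ws : List String) : pvRuns ws = pvSplitR [] ws := by
  induction ws using pvRuns.induct with
  | case1 => simp [pvRuns, pvSplitR, pvClose]
  | case2 w ws hd ih =>
    rw [pvRuns]
    simp only [hd, if_true]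
    rw [ih]
    simp [pvSplitR, hd, pvClose]
  | case3 w ws hd ih =>
    rw [pvRuns]
    simp only [hd, Bool.false_eq_true, if_false]
    rw [ih]
    have h1 : pvSplitR [] (w :: ws) = pvSplitR [w] ws := by
      simp [pvSplitR, hd]
    rw [h1, pv_splitR_pending ws [w] (by simp)]
    simp

-- every word of str.split() is nonempty and whitespace-free
lemma pv_split₀_go_good (s : List Char) : ∀ (cur : List Char) (acc : List (List Char)),
    (∀ c ∈ cur, PySem.Chars.isspace c = false) →
    (∀ w ∈ acc, w ≠ [] ∧ ∀ c ∈ w, PySem.Chars.isspace c = false) →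
    ∀ w ∈ PySem.Chars.split₀.go s cur acc, w ≠ [] ∧ ∀ c ∈ w, PySem.Chars.isspace c = false := by
  induction s with
  | nil =>
    intro cur acc hcur hacc w hw
    rw [PySem.Chars.split₀.go] at hw
    by_cases hc : cur.isEmpty = true
    · rw [if_pos hc] at hw
      exact hacc w (by simpa using hw)
    · rw [if_neg hc] at hw
      simp only [List.mem_reverse, List.mem_cons] at hw
      rcases hw with h1 | h1
      · subst h1
        refine ⟨by simpa [List.isEmpty_iff] using hc, ?_⟩
        intro c hc'; exact hcur c (by simpa using hc')
      · exact hacc w h1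
  | cons c rest ih =>
    intro cur acc hcur hacc w hw
    rw [PySem.Chars.split₀.go] at hw
    by_cases hs : PySem.Chars.isspace c = true
    · rw [if_pos hs] at hw
      by_cases hc : cur.isEmpty = true
      · rw [if_pos hc] at hw
        exact ih [] acc (by simp) hacc w hw
      · rw [if_neg hc] at hw
        refine ih [] (cur.reverse :: acc) (by simp) ?_ w hw
        intro v hv
        rcases List.mem_cons.mp hv with h1 | h1
        · subst h1
          refine ⟨by simpa [List.isEmpty_iff] using hc, ?_⟩
          intro d hd; exact hcur d (by simpa using hd)
        · exact hacc v h1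
    · rw [if_neg hs] at hw
      refine ih (c :: cur) acc ?_ hacc w hw
      intro d hd
      rcases List.mem_cons.mp hd with h1 | h1
      · subst h1; simpa using hs
      · exact hcur d h1

lemma pv_split₀_good (s : String) : ∀ w ∈ PySem.Str.split₀ s, pvGoodW w := by
  intro w hw
  simp only [PySem.Str.split₀, List.mem_map] at hw
  obtain ⟨v, hv, rfl⟩ := hw
  have := pv_split₀_go_good s.toList [] [] (by simp) (by simp) v hv
  simpa [pvGoodW, String.toList_ofList] using this

-- ===== VERDICT (by name: the statement is the Claim_ definition above) =====
theorem clean_and_split_clues_spec : Claim_equal_clean_and_split_clues := by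
  intro text _hdom
  unfold Spec_clean_and_split_clues clean_and_split_clues clean_and_split_clues_alt
  simp only [List.foldl_cons, List.foldl_nil]
  have hgood := pv_split₀_good (PySem.Str.replace (PySem.Str.replace (PySem.Str.replace
    (PySem.Str.replace (PySem.Str.replace (PySem.Str.replace text "ORIZZONTALI" "")
      "VERTICALI" "") ":" "") "-" "") "_" "") "." "")
  rw [pv_runs_eq_splitR]
  have hmain := pv_foldA (PySem.Str.split₀ (PySem.Str.replace (PySem.Str.replace (PySem.Str.replace
    (PySem.Str.replace (PySem.Str.replace (PySem.Str.replace text "ORIZZONTALI" "")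
      "VERTICALI" "") ":" "") "-" "") "_" "") "." "")) [] [] (by simp) hgood
  rw [List.nil_append] at hmain
  exact hmain
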